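-- pv_equiv track=rewrite | github.com/Yaseen549/pygrams | pygrams/haselements.py | has_operator
-- ===== SOURCE A (Python) =====
-- def has_operator(container):
--     """
--     Checks if the container contains any of the operators (+, -, *, /, %).
--
--     Parameters:
--     ----------
--     container : str or list of str
--         A string or list of characters to check for operators.
--
--     Returns:
--     -------
--     bool
--         True if any operator exists, False otherwise.
--
--     Raises:
--     ------
--     TypeError
--         If the input is not a string or a list of characters.
--
--     Examples:
--     --------
--     >>> has_operator("Hello + world")
--     True
--
--     >>> has_operator("Hello world")
--     False
--     """
--     # Check input type
--     if not isinstance(container, (str, list)):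
--         raise TypeError("Input must be a string or a list of characters.")
--
--     operators = ["+", "-", "*", "/", "%"]
--     for operator in operators:
--         if operator in container:
--             return True
--     return False
-- ===== SOURCE B (Python) =====
-- def has_operator(container):
--     if not isinstance(container, (str, list)):
--         raise TypeError("Input must be a string or a list of characters.")
--     ops = {'+', '-', '*', '/', '%'}
--     return any(c in ops for c in container)
-- ===== Notes on version B (the rewrite author's own statement) =====
-- stated objective: idiomatic
-- what changed: B makes one pass over the container's characters testing each against an operator set, instead of A's loop over the five operators each scanning the whole container with a substring test; single-char operators make the two equivalent.
import Mathlib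
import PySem

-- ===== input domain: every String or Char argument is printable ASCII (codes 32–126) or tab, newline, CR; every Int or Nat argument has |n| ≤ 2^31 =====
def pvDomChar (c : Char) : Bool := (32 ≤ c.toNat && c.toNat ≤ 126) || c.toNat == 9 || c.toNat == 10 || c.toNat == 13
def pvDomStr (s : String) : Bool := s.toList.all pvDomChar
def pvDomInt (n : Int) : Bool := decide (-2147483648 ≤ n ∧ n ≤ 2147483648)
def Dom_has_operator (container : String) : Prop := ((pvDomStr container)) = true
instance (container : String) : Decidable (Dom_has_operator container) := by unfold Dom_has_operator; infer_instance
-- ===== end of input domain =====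

-- ===== PORT A =====
-- A: for each of the five operators, test substring membership in the container.
def has_operator (container : String) : Bool :=
  let operators := ["+", "-", "*", "/", "%"]
  operators.any (fun op => PySem.Str.isIn op container)

-- ===== PORT B =====
-- B (idiomatic): one pass over the container's characters against an operator set.
def has_operator_alt (container : String) : Bool :=
  container.toList.any (fun c => ['+', '-', '*', '/', '%'].contains c)

-- ===== PRECONDITION & SPEC =====
def Spec_has_operator (container : String) (out : Bool) : Prop := out = has_operator_alt container
instance (container : String) (out : Bool) : Decidable (Spec_has_operator container out) := by unfold Spec_has_operator; infer_instance

-- ===== CLAIM (what is proved, stated in full; the proofs are below) =====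
def Claim_equal_has_operator : Prop := ∀ (container : String), Dom_has_operator container → Spec_has_operator container (has_operator container)

-- ===== LEMMAS AND PROOFS =====

-- ===== VERDICT (by name: the statement is the Claim_ definition above) =====
-- a singleton substring occurs iff the character is an element
theorem singleton_isIn_iff (c : Char) (l : List Char) :
    PySem.Chars.isIn [c] l = true ↔ c ∈ l := by
  rw [PySem.Chars.isIn_iff_infix]
  constructor
  · rintro ⟨p, q, h⟩; subst h; simp
  · intro h
    obtain ⟨p, q, h⟩ := List.mem_iff_append.mp h
    exact ⟨p, q, by simp [h]⟩

theorem has_operator_spec : Claim_equal_has_operator := by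
  intro container _
  unfold Spec_has_operator has_operator has_operator_alt
  rw [Bool.eq_iff_iff]
  simp only [List.any_eq_true, List.mem_cons, List.not_mem_nil, or_false, PySem.Str.isIn,
    List.contains_eq_mem, decide_eq_true_eq]
  constructor
  · rintro ⟨op, hop, hin⟩
    rcases hop with rfl|rfl|rfl|rfl|rfl
    · rw [show "+".toList = ['+'] from by decide, singleton_isIn_iff] at hin
      exact ⟨_, hin, by simp⟩
    · rw [show "-".toList = ['-'] from by decide, singleton_isIn_iff] at hin
      exact ⟨_, hin, by simp⟩
    · rw [show "*".toList = ['*'] from by decide, singleton_isIn_iff] at hin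
      exact ⟨_, hin, by simp⟩
    · rw [show "/".toList = ['/'] from by decide, singleton_isIn_iff] at hin
      exact ⟨_, hin, by simp⟩
    · rw [show "%".toList = ['%'] from by decide, singleton_isIn_iff] at hin
      exact ⟨_, hin, by simp⟩
  · rintro ⟨c, hc, h⟩
    rcases h with rfl|rfl|rfl|rfl|rfl
    · exact ⟨"+", by simp, by rw [show "+".toList = ['+'] from by decide]; exact (singleton_isIn_iff _ _).mpr hc⟩
    · exact ⟨"-", by simp, by rw [show "-".toList = ['-'] from by decide]; exact (singleton_isIn_iff _ _).mpr hc⟩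
    · exact ⟨"*", by simp, by rw [show "*".toList = ['*'] from by decide]; exact (singleton_isIn_iff _ _).mpr hc⟩
    · exact ⟨"/", by simp, by rw [show "/".toList = ['/'] from by decide]; exact (singleton_isIn_iff _ _).mpr hc⟩
    · exact ⟨"%", by simp, by rw [show "%".toList = ['%'] from by decide]; exact (singleton_isIn_iff _ _).mpr hc⟩
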